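-- pv_equiv track=rewrite | github.com/MrBrantCode/unitest_baseline | mut_generate/mist_train_taco/taco_3837/solution.py | min_remove
-- ===== SOURCE A (Python) =====
-- from collections import Counter
--
-- def min_remove(A, B):
--     # Convert arrays to sets to find common elements
--     s1 = set(A)
--     s2 = set(B)
--
--     # Find the intersection of both sets
--     common_elements = s1.intersection(s2)
--
--     # Initialize the answer to 0
--     ans = 0
--
--     # Count the frequency of elements in both arrays
--     c1 = Counter(A)
--     c2 = Counter(B)
--
--     # For each common element, add the minimum count from both arrays to the answer
--     for v in common_elements:
--         ans += min(c1[v], c2[v])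
--
--     # Return the total number of elements to remove
--     return ans
-- ===== SOURCE B (Python) =====
-- def min_remove(A, B):
--     sa = sorted(A)
--     sb = sorted(B)
--     i = j = ans = 0
--     while i < len(sa) and j < len(sb):
--         if sa[i] == sb[j]:
--             ans += 1
--             i += 1
--             j += 1
--         elif sa[i] < sb[j]:
--             i += 1
--         else:
--             j += 1
--     return ans
-- ===== Notes on version B (the rewrite author's own statement) =====
-- stated objective: alternative
-- what changed: Replaces sets and Counters with a merge scan: sort copies of both lists and walk them with two pointers, counting matched pairs; no hashing, no per-element min of counts.
import Mathlib
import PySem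

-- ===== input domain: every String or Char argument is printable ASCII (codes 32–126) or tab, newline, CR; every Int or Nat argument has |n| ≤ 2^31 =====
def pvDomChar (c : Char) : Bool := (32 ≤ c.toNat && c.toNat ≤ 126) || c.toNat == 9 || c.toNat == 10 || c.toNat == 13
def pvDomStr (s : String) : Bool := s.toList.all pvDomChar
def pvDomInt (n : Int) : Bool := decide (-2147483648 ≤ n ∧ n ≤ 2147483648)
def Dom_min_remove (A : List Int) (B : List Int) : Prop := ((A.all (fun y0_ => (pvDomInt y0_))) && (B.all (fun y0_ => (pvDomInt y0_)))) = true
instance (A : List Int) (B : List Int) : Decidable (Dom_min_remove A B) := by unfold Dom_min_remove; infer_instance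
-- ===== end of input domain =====

-- B replaces A's sets-and-Counters tally with a two-pointer merge scan over sorted copies (alternative algorithm, same result).

-- ===== PORT A =====
def min_remove (A : List Int) (B : List Int) : Int :=
  let s1 := PySem.Set.ofList A
  let s2 := PySem.Set.ofList B
  let common := PySem.Set.inter s1 s2
  let c1 := PySem.Dict.counter A
  let c2 := PySem.Dict.counter B
  common.foldl (fun ans v => ans + min (c1.getD v 0) (c2.getD v 0)) 0

-- ===== PORT B =====
-- the two-pointer while loop of Source B, as recursion on the two sorted lists
def pvMergeCount : List Int → List Int → Int
  | [], _ => 0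
  | _ :: _, [] => 0
  | x :: xs, y :: ys =>
    if x = y then pvMergeCount xs ys + 1
    else if x < y then pvMergeCount xs (y :: ys)
    else pvMergeCount (x :: xs) ys
  termination_by xs ys => xs.length + ys.length

def min_remove_alt (A : List Int) (B : List Int) : Int :=
  let sa := PySem.List.sorted A (fun x => x) false
  let sb := PySem.List.sorted B (fun x => x) false
  pvMergeCount sa sb

-- ===== PRECONDITION & SPEC =====
def Spec_min_remove (A : List Int) (B : List Int) (out : Int) : Prop := out = min_remove_alt A B
instance (A : List Int) (B : List Int) (out : Int) : Decidable (Spec_min_remove A B out) := by unfold Spec_min_remove; infer_instance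

-- ===== CLAIM (what is proved, stated in full; the proofs are below) =====
def Claim_equal_min_remove : Prop := ∀ (A : List Int) (B : List Int), Dom_min_remove A B → Spec_min_remove A B (min_remove A B)

-- ===== LEMMAS AND PROOFS =====

-- B's merge scan over two ≤-sorted lists counts the multiset intersection
theorem pvMergeCount_eq_card (xs ys : List Int)
    (hx : xs.Pairwise (· ≤ ·)) (hy : ys.Pairwise (· ≤ ·)) :
    pvMergeCount xs ys = (Multiset.card ((xs : Multiset Int) ∩ (ys : Multiset Int)) : Int) := by
  induction xs, ys using pvMergeCount.induct with
  | case1 ys => simp [pvMergeCount]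
  | case2 x xs => simp [pvMergeCount]
  | case3 xs y ys ih =>
    have h1 : ((y :: xs : List Int) : Multiset Int) ∩ (y :: ys : List Int) =
        y ::ₘ (((xs : List Int) : Multiset Int) ∩ (ys : List Int)) := by
      ext a
      simp only [Multiset.count_inter, Multiset.count_cons, Multiset.coe_count,
        List.count_cons, beq_iff_eq]
      rcases eq_or_ne a y with h | h
      · subst h; simp
      · simp [h, Ne.symm h]
    rw [pvMergeCount, if_pos rfl, h1]
    simp [ih ((List.pairwise_cons.mp hx).2) ((List.pairwise_cons.mp hy).2)]
  | case4 x xs y ys hne hlt ih =>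
    have hx0 : List.count x (y :: ys) = 0 := by
      rw [List.count_eq_zero]
      intro hmem
      rcases List.mem_cons.mp hmem with h | h
      · omega
      · have := (List.pairwise_cons.mp hy).1 x h
        omega
    have h1 : ((x :: xs : List Int) : Multiset Int) ∩ (y :: ys : List Int) =
        ((xs : List Int) : Multiset Int) ∩ (y :: ys : List Int) := by
      ext a
      simp only [Multiset.count_inter, Multiset.coe_count, List.count_cons, beq_iff_eq]
      rcases eq_or_ne a x with h | h
      · subst h
        simp only [List.count_cons, beq_iff_eq] at hx0
        omega
      · simp [Ne.symm h]
    rw [pvMergeCount, if_neg hne, if_pos hlt, h1]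
    exact ih ((List.pairwise_cons.mp hx).2) hy
  | case5 x xs y ys hne hnlt ih =>
    have hgt : y < x := by omega
    have hy0 : List.count y (x :: xs) = 0 := by
      rw [List.count_eq_zero]
      intro hmem
      rcases List.mem_cons.mp hmem with h | h
      · omega
      · have := (List.pairwise_cons.mp hx).1 y h
        omega
    have h1 : ((x :: xs : List Int) : Multiset Int) ∩ (y :: ys : List Int) =
        ((x :: xs : List Int) : Multiset Int) ∩ ((ys : List Int) : Multiset Int) := by
      ext a
      simp only [Multiset.count_inter, Multiset.coe_count, List.count_cons, beq_iff_eq]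
      rcases eq_or_ne a y with h | h
      · subst h
        simp only [List.count_cons, beq_iff_eq] at hy0
        omega
      · simp [Ne.symm h]
    rw [pvMergeCount, if_neg hne, if_neg hnlt, h1]
    exact ih hx ((List.pairwise_cons.mp hy).2)

-- A's sum over the common set equals the multiset-intersection cardinality
theorem minsum_eq_card (A B : List Int) :
    ((PySem.Set.inter (PySem.Set.ofList A) (PySem.Set.ofList B)).map
        (fun v => min ((A.count v : Int)) ((B.count v : Int)))).sum
      = (Multiset.card ((A : Multiset Int) ∩ (B : Multiset Int)) : Int) := by
  have hnd : (PySem.Set.inter (PySem.Set.ofList A) (PySem.Set.ofList B)).Nodup :=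
    PySem.Set.nodup_inter _ _ (PySem.Set.nodup_ofList A)
  rw [← List.sum_toFinset _ hnd]
  have hfin : (PySem.Set.inter (PySem.Set.ofList A) (PySem.Set.ofList B)).toFinset
      = ((A : Multiset Int) ∩ (B : Multiset Int)).toFinset := by
    ext v
    simp [PySem.Set.mem_inter, PySem.Set.mem_ofList, Multiset.mem_toFinset]
  rw [hfin, ← Multiset.toFinset_sum_count_eq ((A : Multiset Int) ∩ (B : Multiset Int))]
  push_cast
  refine Finset.sum_congr rfl ?_
  intro v _
  simp [Multiset.coe_count, Nat.cast_min]

-- ===== VERDICT (by name: the statement is the Claim_ definition above) =====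
theorem min_remove_spec : Claim_equal_min_remove := by
  intro A B _
  show min_remove A B = min_remove_alt A B
  unfold min_remove min_remove_alt
  simp only [PySem.List.foldl_add, zero_add, PySem.Dict.getD_counter]
  have hA : ((PySem.List.sorted A (fun x => x) false : List Int) : Multiset Int) = (A : Multiset Int) :=
    Quot.sound (PySem.List.sorted_perm A (fun x => x) false)
  have hB : ((PySem.List.sorted B (fun x => x) false : List Int) : Multiset Int) = (B : Multiset Int) :=
    Quot.sound (PySem.List.sorted_perm B (fun x => x) false)
  rw [pvMergeCount_eq_card _ _ (PySem.List.sorted_pairwise A (fun x => x))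
        (PySem.List.sorted_pairwise B (fun x => x)), hA, hB]
  exact minsum_eq_card A B
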